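-- pv_equiv track=rewrite | github.com/GabrielAlbaSerrano/Computational_Algebra | actividad1.py | eliminar5
-- ===== SOURCE A (Python) =====
-- def eliminar5(n):
--     #Convertimos el entero n en una cadena de caracteres
--     s=str(n)
--     r=""
--     #En r vamos a ir añadiendo los caracteres de s que son diferentes a 5
--     for i in range(len(s)):
--         if s[i]!='5':
--             r=r+s[i]
--     #Es importante observar que el comando int no funciona con la cadena vacía "" y con "-"
--     if r=="" or r=="-":
--         result=0
--     else:
--         result=int(r)
--     return result
-- ===== SOURCE B (Python) =====
-- def eliminar5(n):
--     # Arithmetic digit-peeling: no string conversion; reads digits with divmod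
--     # from least to most significant and rebuilds the number without the 5s.
--     m = abs(n)
--     place = 1
--     result = 0
--     while m:
--         m, d = divmod(m, 10)
--         if d != 5:
--             result += d * place
--             place *= 10
--     return -result if n < 0 else result
-- ===== Notes on version B (the rewrite author's own statement) =====
-- stated objective: alternative
-- what changed: B replaces A's string round-trip (str(n), filter characters != '5', int back) by pure arithmetic: it peels digits of abs(n) with divmod from least to most significant and rebuilds the result with a running place value, applying the sign at the end.
import Mathlib
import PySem

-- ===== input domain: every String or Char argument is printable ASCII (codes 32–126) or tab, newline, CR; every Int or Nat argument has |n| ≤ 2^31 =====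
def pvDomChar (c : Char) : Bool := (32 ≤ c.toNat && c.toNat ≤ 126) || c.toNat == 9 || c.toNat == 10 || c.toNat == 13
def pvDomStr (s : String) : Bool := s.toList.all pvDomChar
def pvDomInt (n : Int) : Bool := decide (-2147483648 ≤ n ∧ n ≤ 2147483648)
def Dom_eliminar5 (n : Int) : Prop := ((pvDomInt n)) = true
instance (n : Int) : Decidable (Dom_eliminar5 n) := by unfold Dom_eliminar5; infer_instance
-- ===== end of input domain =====

-- B rebuilds the number arithmetically (divmod digit peeling) instead of A's str → filter chars → int round trip; objective: alternative (same cost).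

-- ===== PORT A =====
-- hand port of Python's int(r): exact for the only shapes of r that reach it in
-- eliminar5 — an optional leading '-' followed by a nonempty run of digit
-- characters taken from str(n) (no whitespace, no '+', no underscores).
def pyIntDigitsVal (ds : List Char) : Nat :=
  ds.foldl (fun a c => a * 10 + (c.toNat - '0'.toNat)) 0

def pyIntOfValid (r : List Char) : Int :=
  match r with
  | '-' :: ds => -(pyIntDigitsVal ds : Int)
  | ds => (pyIntDigitsVal ds : Int)

def eliminar5 (n : Int) : Int :=
  let s := PySem.Int.toChars n
  let r := (PySem.List.pyRange 0 (PySem.List.len s) 1).foldl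
    (fun r i => if PySem.List.pyGetD s i ' ' != '5' then r ++ [PySem.List.pyGetD s i ' '] else r) []
  if r = [] ∨ r = ['-'] then 0 else pyIntOfValid r

-- ===== PORT B =====
def eliminar5AltGo (m : Nat) (place result : Int) : Int :=
  if m = 0 then result
  else
    let d := m % 10
    if d ≠ 5 then eliminar5AltGo (m / 10) (place * 10) (result + (d : Int) * place)
    else eliminar5AltGo (m / 10) place result
termination_by m
decreasing_by all_goals exact Nat.div_lt_self (Nat.pos_of_ne_zero (by assumption)) (by norm_num)

def eliminar5_alt (n : Int) : Int :=
  let r := eliminar5AltGo n.natAbs 1 0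
  if n < 0 then -r else r

-- ===== PRECONDITION & SPEC =====
def Spec_eliminar5 (n : Int) (out : Int) : Prop := out = eliminar5_alt n
instance (n : Int) (out : Int) : Decidable (Spec_eliminar5 n out) := by unfold Spec_eliminar5; infer_instance

-- ===== CLAIM (what is proved, stated in full; the proofs are below) =====
def Claim_equal_eliminar5 : Prop := ∀ (n : Int), Dom_eliminar5 n → Spec_eliminar5 n (eliminar5 n)

-- ===== LEMMAS AND PROOFS =====

-- the digit-removal function both programs compute, MSB-free mathematical form
def rem5 (m : Nat) : Nat :=
  if m = 0 then 0
  else if m % 10 = 5 then rem5 (m / 10)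
  else rem5 (m / 10) * 10 + m % 10
termination_by m
decreasing_by all_goals exact Nat.div_lt_self (Nat.pos_of_ne_zero (by assumption)) (by norm_num)

-- decimal digit characters of m, most significant first (= Nat.toDigits 10 m)
def natChars (m : Nat) : List Char :=
  if m < 10 then [Nat.digitChar m]
  else natChars (m / 10) ++ [Nat.digitChar (m % 10)]
termination_by m
decreasing_by exact Nat.div_lt_self (by omega) (by norm_num)

lemma altGo_eq (m : Nat) : ∀ place result : Int,
    eliminar5AltGo m place result = result + place * (rem5 m : Int) := by
  induction m using Nat.strong_induction_on with
  | _ m ih =>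
    intro place result
    by_cases h0 : m = 0
    · subst h0; rw [eliminar5AltGo, rem5]; simp
    · have hlt : m / 10 < m := Nat.div_lt_self (Nat.pos_of_ne_zero h0) (by norm_num)
      rw [eliminar5AltGo, rem5]
      by_cases h5 : m % 10 = 5
      · simp only [h0, if_false, h5, if_true]
        simp only [ne_eq, not_true_eq_false, if_false, ih _ hlt]
      · simp only [h0, if_false, if_neg h5, ne_eq, ih _ hlt]
        rw [if_pos h5]
        push_cast
        ring

lemma alt_eq (n : Int) :
    eliminar5_alt n = if n < 0 then -(rem5 n.natAbs : Int) else (rem5 n.natAbs : Int) := by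
  unfold eliminar5_alt
  rw [altGo_eq]
  simp

lemma toDigitsCore_eq (f : Nat) : ∀ (m : Nat) (acc : List Char), m < f →
    Nat.toDigitsCore 10 f m acc = natChars m ++ acc := by
  induction f with
  | zero => intro m acc h; omega
  | succ f ih =>
    intro m acc h
    rw [Nat.toDigitsCore, natChars]
    by_cases h10 : m < 10
    · have : m / 10 = 0 := Nat.div_eq_of_lt h10
      simp only [this, if_pos h10]
      have : m % 10 = m := Nat.mod_eq_of_lt h10
      rw [this]
      rfl
    · have hne : m / 10 ≠ 0 := by
        intro hc; exact h10 (by omega)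
      have hlt : m / 10 < f := by omega
      simp only [if_neg hne, if_neg h10]
      rw [ih _ _ hlt, List.append_assoc]
      rfl

lemma toDigits_eq (m : Nat) : Nat.toDigits 10 m = natChars m :=
  (toDigitsCore_eq (m + 1) m [] (by omega)).trans (by simp)

lemma mem_natChars {c : Char} {m : Nat} (h : c ∈ natChars m) :
    ∃ d, d < 10 ∧ c = Nat.digitChar d := by
  induction m using Nat.strong_induction_on with
  | _ m ih =>
    rw [natChars] at h
    by_cases h10 : m < 10
    · rw [if_pos h10] at h
      simp at h
      exact ⟨m, h10, h⟩
    · rw [if_neg h10] at h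
      rcases List.mem_append.1 h with h' | h'
      · exact ih (m / 10) (Nat.div_lt_self (by omega) (by norm_num)) h'
      · simp at h'
        exact ⟨m % 10, Nat.mod_lt _ (by norm_num), h'⟩

lemma digitChar_ne_five {d : Nat} (h : d < 10) : (Nat.digitChar d != '5') = !(d == 5) := by
  interval_cases d <;> decide

lemma digitChar_val {d : Nat} (h : d < 10) : (Nat.digitChar d).toNat - 48 = d := by
  interval_cases d <;> decide

lemma digitChar_ne_dash {d : Nat} (h : d < 10) : Nat.digitChar d ≠ '-' := by
  interval_cases d <;> decide

-- the filtered digit list both programs agree on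
def F5 (m : Nat) : List Char := (natChars m).filter (fun c => c != '5')

lemma main_lemma (m : Nat) :
    pyIntDigitsVal (F5 m) = rem5 m ∧ (F5 m = [] → rem5 m = 0) := by
  induction m using Nat.strong_induction_on with
  | _ m ih =>
    by_cases h10 : m < 10
    · have hF : F5 m = if m = 5 then [] else [Nat.digitChar m] := by
        unfold F5
        rw [natChars, if_pos h10, List.filter_singleton, digitChar_ne_five h10]
        by_cases h5 : m = 5
        · simp [h5]
        · rw [beq_eq_false_iff_ne.mpr h5]
          simp [h5]
      by_cases h5 : m = 5
      · subst h5
        rw [hF, if_pos rfl]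
        have h50 : rem5 5 = 0 := by rw [rem5, rem5]; norm_num
        exact ⟨by rw [h50]; rfl, fun _ => h50⟩
      · rw [hF, if_neg h5]
        have hv : pyIntDigitsVal [Nat.digitChar m] = m := by
          unfold pyIntDigitsVal
          simp [List.foldl, digitChar_val h10]
        have hr : rem5 m = m := by
          by_cases h0 : m = 0
          · subst h0; rw [rem5]; simp
          · rw [rem5, if_neg h0, if_neg (by omega : ¬ m % 10 = 5)]
            have : m / 10 = 0 := Nat.div_eq_of_lt h10
            rw [this, rem5]
            simp
            omega
        exact ⟨by rw [hv, hr], by simp⟩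
    · have hlt : m / 10 < m := Nat.div_lt_self (by omega) (by norm_num)
      obtain ⟨ihv, ihz⟩ := ih _ hlt
      have hd : m % 10 < 10 := Nat.mod_lt _ (by norm_num)
      have hF : F5 m = F5 (m / 10) ++ if m % 10 = 5 then [] else [Nat.digitChar (m % 10)] := by
        unfold F5
        rw [natChars, if_neg h10, List.filter_append]
        congr 1
        rw [List.filter_singleton, digitChar_ne_five hd]
        by_cases h5 : m % 10 = 5
        · simp [h5]
        · rw [beq_eq_false_iff_ne.mpr h5]
          simp [h5]
      rw [hF, rem5, if_neg (by omega : ¬ m = 0)]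
      by_cases h5 : m % 10 = 5
      · rw [if_pos h5, if_pos h5, List.append_nil]
        exact ⟨ihv, ihz⟩
      · rw [if_neg h5, if_neg h5]
        constructor
        · unfold pyIntDigitsVal at ihv ⊢
          rw [List.foldl_append, ihv]
          simp [List.foldl, digitChar_val hd]
        · intro hc
          exact absurd hc (by simp)

lemma pyIntOfValid_cons {c : Char} {t : List Char} (hc : c ≠ '-') :
    pyIntOfValid (c :: t) = (pyIntDigitsVal (c :: t) : Int) := by
  unfold pyIntOfValid
  split
  · rename_i heq
    rw [List.cons.injEq] at heq
    exact absurd heq.1 hc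
  · rfl

lemma filter_loop (n : Int) :
    ((PySem.List.pyRange 0 (PySem.List.len (PySem.Int.toChars n)) 1).foldl
      (fun r i => if PySem.List.pyGetD (PySem.Int.toChars n) i ' ' != '5'
        then r ++ [PySem.List.pyGetD (PySem.Int.toChars n) i ' '] else r) [])
      = (PySem.Int.toChars n).filter (fun c => c != '5') := by
  rw [PySem.List.foldl_pyRange_pyGetD (PySem.Int.toChars n) ' '
      (fun r c => if c != '5' then r ++ [c] else r) [] (a := 0) (by norm_num)]
  rw [show ((0:Int).toNat) = 0 from rfl, List.drop_zero]
  rw [PySem.List.foldl_append_if_eq_filter]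
  simp

lemma head_not_dash {m : Nat} {c : Char} {t : List Char} (h : F5 m = c :: t) : c ≠ '-' := by
  have hc : c ∈ F5 m := by rw [h]; exact List.mem_cons_self
  have : c ∈ natChars m := List.mem_of_mem_filter hc
  obtain ⟨d, hd, rfl⟩ := mem_natChars this
  exact digitChar_ne_dash hd

-- ===== VERDICT (by name: the statement is the Claim_ definition above) =====
theorem eliminar5_spec : Claim_equal_eliminar5 := by
  intro n _
  unfold Spec_eliminar5 eliminar5
  simp only [filter_loop]
  rw [alt_eq]
  unfold PySem.Int.toChars
  obtain ⟨hval, hzero⟩ := main_lemma n.natAbs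
  by_cases hneg : n < 0
  · rw [if_pos hneg, if_pos hneg]
    have habs : n.toNat = 0 := by omega
    have hfilter : List.filter (fun c => c != '5') ('-' :: Nat.toDigits 10 n.natAbs)
        = '-' :: F5 n.natAbs := by
      rw [List.filter_cons_of_pos (by decide), toDigits_eq]; rfl
    rw [hfilter]
    rcases hF : F5 n.natAbs with _ | ⟨c, t⟩
    · rw [hF] at hzero
      simp only [List.cons_ne_nil, false_or]
      rw [if_pos trivial, hzero rfl]
      simp
    · have hne : ¬('-' :: c :: t = [] ∨ '-' :: c :: t = ['-']) := by simp
      rw [if_neg hne]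
      show pyIntOfValid ('-' :: c :: t) = _
      unfold pyIntOfValid
      rw [hF] at hval
      rw [← hval]
      rfl
  · rw [if_neg hneg, if_neg hneg]
    have habs : n.toNat = n.natAbs := by omega
    rw [habs, toDigits_eq]
    show (if F5 n.natAbs = [] ∨ F5 n.natAbs = ['-'] then 0 else pyIntOfValid (F5 n.natAbs)) = _
    rcases hF : F5 n.natAbs with _ | ⟨c, t⟩
    · rw [if_pos (Or.inl rfl), hzero hF]
      simp
    · have hdash : c ≠ '-' := head_not_dash hF
      have hne : ¬(c :: t = [] ∨ c :: t = ['-']) := by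
        rintro (h | h)
        · exact List.cons_ne_nil _ _ h
        · rw [List.cons.injEq] at h; exact hdash h.1
      rw [if_neg hne, pyIntOfValid_cons hdash, ← hF, hval]
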